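-- pv_equiv track=rewrite | github.com/kritishmohapatra/GFG_SOLUTIONS | Difficulty: Hard/Longest Periodic Proper Prefix/longest-periodic-proper-prefix.py | getLongestPrefix
-- ===== SOURCE A (Python) =====
-- def getLongestPrefix(s):
--     # code here
--     n = len(s)
--
--     for k in range(n - 1, 0, -1):
--         valid = True
--         for i in range(k, n):
--             if s[i] != s[i % k]:
--                 valid = False
--                 break
--         if valid:
--             return k
--
--     return -1
-- ===== SOURCE B (Python) =====
-- def getLongestPrefix(s):
--     # KMP failure function: lps[i] = length of the longest proper border of
--     # s[:i+1].  The largest proper period is n minus the SMALLEST positive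
--     # border, obtained by following the lps chain down from lps[n-1].
--     n = len(s)
--     if n <= 1:
--         return -1
--     lps = [0] * n
--     length = 0
--     for i in range(1, n):
--         while length > 0 and s[i] != s[length]:
--             length = lps[length - 1]
--         if s[i] == s[length]:
--             length += 1
--         lps[i] = length
--     b = lps[n - 1]
--     if b == 0:
--         return -1
--     while lps[b - 1] > 0:
--         b = lps[b - 1]
--     return n - b
-- ===== Notes on version B (the rewrite author's own statement) =====
-- stated objective: faster
-- what changed: A tries every candidate period k from n-1 downward, re-verifying each with an O(n) modular character scan; B computes the KMP failure function (lps) in one linear pass and returns n minus the smallest positive border found by following the lps chain from lps[n-1], with no candidate-period scan at all.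
import Mathlib
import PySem

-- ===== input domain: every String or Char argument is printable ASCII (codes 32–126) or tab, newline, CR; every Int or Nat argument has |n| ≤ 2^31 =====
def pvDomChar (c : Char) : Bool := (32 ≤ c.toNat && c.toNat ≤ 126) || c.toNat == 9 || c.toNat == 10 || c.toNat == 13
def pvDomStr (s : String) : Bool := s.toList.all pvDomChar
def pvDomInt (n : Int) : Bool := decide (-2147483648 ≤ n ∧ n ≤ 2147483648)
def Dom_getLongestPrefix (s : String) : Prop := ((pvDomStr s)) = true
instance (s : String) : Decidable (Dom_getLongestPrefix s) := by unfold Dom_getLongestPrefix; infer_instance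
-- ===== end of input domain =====

-- B replaces A's downward scan over candidate periods (each re-verified by a modular
-- character loop) with the linear-time KMP failure function: answer = n - smallest
-- positive border, found by following the lps chain (measured asymptotically faster).


-- ===== PORT A =====
-- inner loop: 'valid' flag with break = short-circuit all over range(k, n)
def pvAValid (s : String) (n k : Int) : Bool :=
  (PySem.List.pyRange k n 1).all fun i =>
    PySem.Str.pyGet? s i == PySem.Str.pyGet? s (PySem.Int.mod i k)

def pvALoop (s : String) (n : Int) : List Int → Int
  | [] => -1
  | k :: ks => if pvAValid s n k then k else pvALoop s n ks

def getLongestPrefix (s : String) : Int :=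
  let n := PySem.Str.len s
  pvALoop s n (PySem.List.pyRange (n - 1) 0 (-1))

-- ===== PORT B =====
-- 'while length > 0 and s[i] != s[length]: length = lps[length-1]'; fuel = current
-- length suffices because each lps value is strictly smaller than its index + 1
def pvKmpInner (cs : List Char) (lps : List Nat) (ci : Char) : Nat → Nat → Nat
  | 0, _ => 0
  | l + 1, 0 => l + 1
  | l + 1, f + 1 =>
      if ci = cs.getD (l + 1) ' ' then l + 1
      else pvKmpInner cs lps ci (lps.getD l 0) f

-- one iteration of 'for i in range(1, n)'; 'lps[i] = length' with increasing i = append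
def pvKmpStep (cs : List Char) (st : List Nat × Nat) (i : Nat) : List Nat × Nat :=
  let len0 := pvKmpInner cs st.1 (cs.getD i ' ') st.2 st.2
  let len := if cs.getD i ' ' = cs.getD len0 ' ' then len0 + 1 else len0
  (st.1 ++ [len], len)

-- 'while lps[b-1] > 0: b = lps[b-1]'; fuel = b suffices since lps[b-1] < b
def pvChain (lps : List Nat) : Nat → Nat → Nat
  | b, 0 => b
  | b, f + 1 => if lps.getD (b - 1) 0 > 0 then pvChain lps (lps.getD (b - 1) 0) f else b

def getLongestPrefix_alt (s : String) : Int :=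
  let cs := s.toList
  let n := cs.length
  if n ≤ 1 then -1
  else
    let st := (List.range' 1 (n - 1)).foldl (pvKmpStep cs) ([0], 0)
    let b := st.1.getD (n - 1) 0
    if b = 0 then -1 else (n : Int) - (pvChain st.1 b b : Nat)

-- ===== PRECONDITION & SPEC =====
def Spec_getLongestPrefix (s : String) (out : Int) : Prop := out = getLongestPrefix_alt s
instance (s : String) (out : Int) : Decidable (Spec_getLongestPrefix s out) := by
  unfold Spec_getLongestPrefix; infer_instance

-- ===== CLAIM =====
def Claim_equal_getLongestPrefix : Prop :=
  ∀ (s : String), Dom_getLongestPrefix s → Spec_getLongestPrefix s (getLongestPrefix s)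

-- ===== LEMMAS AND PROOFS =====

-- b is a (proper) border of q: the length-b prefix equals the length-b suffix
def IsB (q : List Char) (b : Nat) : Prop := b < q.length ∧ q.take b = q.drop (q.length - b)

-- m is the longest border of q
def MaxB (q : List Char) (m : Nat) : Prop := IsB q m ∧ ∀ b, IsB q b → b ≤ m

theorem isB_zero (q : List Char) (h : 0 < q.length) : IsB q 0 := ⟨h, by simp⟩

theorem getD_append_lt (l : List Nat) (x j d : Nat) (h : j < l.length) :
    (l ++ [x]).getD j d = l.getD j d := by
  rw [List.getD_eq_getElem _ _ (by simp; omega), List.getD_eq_getElem _ _ h,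
      List.getElem_append_left h]

theorem getD_append_self (l : List Nat) (x d : Nat) : (l ++ [x]).getD l.length d = x := by
  rw [List.getD_eq_getElem _ _ (by simp)]
  simp

-- borders of p ++ [c] of positive length b+1 ↔ b borders p and p[b] = c
theorem border_snoc (p : List Char) (c : Char) (b : Nat) :
    IsB (p ++ [c]) (b + 1) ↔ IsB p b ∧ p[b]? = some c := by
  unfold IsB
  constructor
  · rintro ⟨hlt, heq⟩
    have hb : b < p.length := by simp at hlt; omega
    rw [List.length_append, List.length_singleton] at heq
    rw [List.take_append_of_le_length (by omega), List.take_add_one,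
        List.getElem?_eq_getElem hb,
        show p.length + 1 - (b + 1) = p.length - b by omega,
        List.drop_append_of_le_length (by omega)] at heq
    simp only [Option.toList_some] at heq
    rw [← List.concat_eq_append, ← List.concat_eq_append, List.concat_inj] at heq
    exact ⟨⟨hb, heq.1⟩, by rw [List.getElem?_eq_getElem hb, heq.2]⟩
  · rintro ⟨⟨hb, heq⟩, hc⟩
    refine ⟨by simp; omega, ?_⟩
    rw [List.length_append, List.length_singleton,
        List.take_append_of_le_length (by omega), List.take_add_one, hc,
        show p.length + 1 - (b + 1) = p.length - b by omega,
        List.drop_append_of_le_length (by omega)]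
    simp only [Option.toList_some]
    rw [heq]

-- below a border B of q, borders of q are exactly borders of q.take B
theorem border_take (q : List Char) (B b : Nat) (hB : IsB q B) (hb : b < B) :
    IsB q b ↔ IsB (q.take B) b := by
  obtain ⟨hBlt, hBeq⟩ := hB
  have hlen : (q.take B).length = B := by simp; omega
  have hdrop : (q.take B).drop (B - b) = q.drop (q.length - b) := by
    rw [hBeq, List.drop_drop]
    congr 1
    omega
  unfold IsB
  rw [hlen, List.take_take, min_eq_left (le_of_lt hb), hdrop]
  constructor
  · rintro ⟨_, h⟩; exact ⟨hb, h⟩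
  · rintro ⟨_, h⟩; exact ⟨by omega, h⟩

-- period ↔ border core: s has mod-period K iff its length-(L-K) prefix equals its suffix
theorem pvCore (cs : List Char) (K : Nat) (hK : 1 ≤ K) (hKL : K < cs.length) :
    (∀ j, K ≤ j → j < cs.length → cs[j]? = cs[j % K]?) ↔
      cs.take (cs.length - K) = cs.drop K := by
  constructor
  · intro H
    apply List.ext_getElem?
    intro j
    rw [List.getElem?_take, List.getElem?_drop]
    split
    · rename_i hj
      have h1 : cs[K + j]? = cs[(K + j) % K]? := H (K + j) (by omega) (by omega)
      have h2 : (K + j) % K = j % K := Nat.add_mod_left K j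
      by_cases hjK : j < K
      · rw [h1, h2, Nat.mod_eq_of_lt hjK]
      · rw [H j (by omega) (by omega), h1, h2]
    · rename_i hj
      rw [List.getElem?_eq_none (show cs.length ≤ K + j by omega)]
  · intro S
    have S' : ∀ j, j < cs.length - K → cs[j]? = cs[K + j]? := by
      intro j hj
      have h := congrArg (fun l => l[j]?) S
      simp only [List.getElem?_take, List.getElem?_drop, if_pos hj] at h
      exact h
    intro j
    induction j using Nat.strong_induction_on with
    | _ j ih =>
      intro hKj hjL
      have hstep : cs[j]? = cs[j - K]? := by
        have := S' (j - K) (by omega)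
        rw [show K + (j - K) = j by omega] at this
        exact this.symm
      have hmod : j % K = (j - K) % K := Nat.mod_eq_sub_mod hKj
      by_cases hc : j - K < K
      · rw [hstep, hmod, Nat.mod_eq_of_lt hc]
      · rw [hstep, hmod, ih (j - K) (by omega) (by omega) (by omega)]

-- A's inner validity check at period k = n - b is the border check at b
theorem valid_iff (s : String) (b : Nat) (h1 : 1 ≤ b) (h2 : b < s.toList.length) :
    pvAValid s (s.toList.length : Int) ((s.toList.length : Int) - (b : Int)) = true ↔
      IsB s.toList b := by
  unfold pvAValid IsB
  set cs := s.toList with hcs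
  set L := cs.length with hL
  set K := L - b with hKdef
  have hKcast : (L : Int) - (b : Int) = (K : Int) := by omega
  have hKpos : 1 ≤ K := by omega
  have hKL : K < L := by omega
  rw [hKcast]
  have hb : b = L - K := by omega
  constructor
  · intro h
    rw [List.all_eq_true] at h
    refine ⟨h2, ?_⟩
    rw [hb, ← pvCore cs K hKpos hKL]
    intro j hKj hjL
    have hmem : ((j : Int)) ∈ PySem.List.pyRange (K : Int) (L : Int) 1 := by
      rw [PySem.List.mem_pyRange_one]; omega
    have := h _ hmem
    rw [PySem.Int.mod_natCast, beq_iff_eq] at this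
    simp only [PySem.Str.pyGet?_natCast] at this
    exact this
  · rintro ⟨-, h⟩
    rw [List.all_eq_true]
    intro i hi
    rw [PySem.List.mem_pyRange_one] at hi
    obtain ⟨j, rfl⟩ : ∃ j : Nat, i = (j : Int) := ⟨i.toNat, by omega⟩
    rw [hb] at h
    have := ((pvCore cs K hKpos hKL).mpr h) j (by omega) (by omega)
    rw [PySem.Int.mod_natCast, beq_iff_eq]
    simp only [PySem.Str.pyGet?_natCast]
    exact this

-- the inner while loop lands on a border r of s[:i] that still dominates all
-- borders of s[:i+1], and exits only at 0 or on a character match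
theorem inner_spec (cs : List Char) (lps : List Nat) (i : Nat)
    (hi : i < cs.length) (hilen : i ≤ lps.length)
    (hlps : ∀ j, j < lps.length → MaxB (cs.take (j + 1)) (lps.getD j 0)) :
    ∀ fuel l, l ≤ fuel → IsB (cs.take i) l →
      (∀ b, IsB (cs.take (i + 1)) b → b ≤ l + 1) →
      IsB (cs.take i) (pvKmpInner cs lps (cs.getD i ' ') l fuel) ∧
      (∀ b, IsB (cs.take (i + 1)) b → b ≤ pvKmpInner cs lps (cs.getD i ' ') l fuel + 1) ∧
      (pvKmpInner cs lps (cs.getD i ' ') l fuel = 0 ∨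
        cs.getD i ' ' = cs.getD (pvKmpInner cs lps (cs.getD i ' ') l fuel) ' ') := by
  have hsnoc : cs.take (i + 1) = cs.take i ++ [cs[i]] := by
    rw [List.take_add_one, List.getElem?_eq_getElem hi]
    rfl
  intro fuel
  induction fuel with
  | zero =>
      intro l hl hIsB hub
      obtain rfl : l = 0 := by omega
      exact ⟨hIsB, hub, Or.inl rfl⟩
  | succ f ihf =>
      intro l hl hIsB hub
      match l with
      | 0 => exact ⟨hIsB, hub, Or.inl rfl⟩
      | l' + 1 =>
        have hli : l' + 1 < i := by
          have := hIsB.1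
          simp at this
          omega
        rw [pvKmpInner]
        by_cases hc : cs.getD i ' ' = cs.getD (l' + 1) ' '
        · rw [if_pos hc]
          exact ⟨hIsB, hub, Or.inr hc⟩
        · rw [if_neg hc]
          have hl'lps : l' < lps.length := by omega
          have hmax : MaxB (cs.take (l' + 1)) (lps.getD l' 0) := hlps l' hl'lps
          have hxlt : lps.getD l' 0 < l' + 1 := by
            have h := hmax.1.1
            rw [List.length_take] at h
            omega
          have htt : (cs.take i).take (l' + 1) = cs.take (l' + 1) := by
            rw [List.take_take]
            congr 1
            omega
          refine ihf (lps.getD l' 0) (by omega) ?_ ?_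
          · rw [border_take (cs.take i) (l' + 1) _ hIsB hxlt, htt]
            exact hmax.1
          · intro b hb
            match b with
            | 0 => omega
            | b' + 1 =>
              rw [hsnoc, border_snoc] at hb
              obtain ⟨hb', hbc⟩ := hb
              have hble : b' ≤ l' + 1 := by
                have := hub (b' + 1) (by rw [hsnoc, border_snoc]; exact ⟨hb', hbc⟩)
                omega
              by_cases hbe : b' = l' + 1
              · exfalso
                subst hbe
                rw [List.getElem?_take_of_lt hli, List.getElem?_eq_getElem (by omega)] at hbc
                apply hc
                rw [List.getD_eq_getElem _ _ hi, List.getD_eq_getElem _ _ (by omega)]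
                injection hbc with hbc'
                rw [hbc']
              · have hblt : b' < l' + 1 := by omega
                have : IsB (cs.take (l' + 1)) b' := by
                  rw [← htt, ← border_take (cs.take i) (l' + 1) _ hIsB hblt]
                  exact hb'
                have := hmax.2 b' this
                omega

-- one step of the fold preserves the lps invariant
theorem step_spec (cs : List Char) (lps : List Nat) (len i : Nat)
    (hi : i < cs.length) (h1 : 1 ≤ i) (hlen : lps.length = i)
    (hlps : ∀ j, j < lps.length → MaxB (cs.take (j + 1)) (lps.getD j 0))
    (hcur : len = lps.getD (i - 1) 0) :
    (pvKmpStep cs (lps, len) i).1.length = i + 1 ∧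
    (∀ j, j < i + 1 → MaxB (cs.take (j + 1)) ((pvKmpStep cs (lps, len) i).1.getD j 0)) ∧
    (pvKmpStep cs (lps, len) i).2 = (pvKmpStep cs (lps, len) i).1.getD i 0 := by
  have hsnoc : cs.take (i + 1) = cs.take i ++ [cs[i]] := by
    rw [List.take_add_one, List.getElem?_eq_getElem hi]
    rfl
  have hprev : MaxB (cs.take i) len := by
    have h := hlps (i - 1) (by omega)
    rw [show i - 1 + 1 = i by omega] at h
    rw [hcur]
    exact h
  have hub0 : ∀ b, IsB (cs.take (i + 1)) b → b ≤ len + 1 := by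
    intro b hb
    match b with
    | 0 => omega
    | b' + 1 =>
      rw [hsnoc, border_snoc] at hb
      have := hprev.2 b' hb.1
      omega
  obtain ⟨hrB, hrUB, hrE⟩ :=
    inner_spec cs lps i hi (by omega) hlps len len le_rfl hprev.1 hub0
  set r := pvKmpInner cs lps (cs.getD i ' ') len len with hrdef
  have hri : r < i := by
    have := hrB.1
    simp at this
    omega
  have hmaxNew : MaxB (cs.take (i + 1))
      (if cs.getD i ' ' = cs.getD r ' ' then r + 1 else r) := by
    by_cases hc : cs.getD i ' ' = cs.getD r ' '
    · rw [if_pos hc]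
      constructor
      · rw [hsnoc, border_snoc]
        refine ⟨hrB, ?_⟩
        rw [List.getElem?_take_of_lt hri, List.getElem?_eq_getElem (by omega)]
        congr 1
        rw [List.getD_eq_getElem _ _ hi, List.getD_eq_getElem _ _ (by omega)] at hc
        exact hc.symm
      · intro b hb
        have := hrUB b hb
        omega
    · rw [if_neg hc]
      have hr0 : r = 0 := by
        rcases hrE with h0 | he
        · exact h0
        · exact absurd he hc
      rw [hr0] at hc ⊢
      constructor
      · exact isB_zero _ (by simp; omega)
      · intro b hb
        match b with
        | 0 => omega
        | b' + 1 =>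
          have hb1 : b' + 1 ≤ 1 := by have := hrUB _ hb; omega
          obtain rfl : b' = 0 := by omega
          exfalso
          rw [hsnoc, border_snoc] at hb
          obtain ⟨-, hbc⟩ := hb
          rw [List.getElem?_take_of_lt (by omega), List.getElem?_eq_getElem (by omega)] at hbc
          apply hc
          rw [List.getD_eq_getElem _ _ hi, List.getD_eq_getElem _ _ (by omega)]
          injection hbc with hbc'
          rw [hbc']
  set len' := if cs.getD i ' ' = cs.getD r ' ' then r + 1 else r with hlen'def
  have hstep : pvKmpStep cs (lps, len) i = (lps ++ [len'], len') := rfl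
  rw [hstep]
  refine ⟨by simp [hlen], ?_, ?_⟩
  · intro j hj
    by_cases hji : j < i
    · rw [getD_append_lt _ _ _ _ (by omega)]
      exact hlps j (by omega)
    · have hji' : j = i := by omega
      rw [hji', ← hlen, getD_append_self, hlen]
      exact hmaxNew
  · rw [← hlen, getD_append_self]

-- the whole fold establishes the lps invariant
theorem fold_spec (cs : List Char) : ∀ k, 1 + k ≤ cs.length →
    ((List.range' 1 k).foldl (pvKmpStep cs) ([0], 0)).1.length = k + 1 ∧
    (∀ j, j < k + 1 → MaxB (cs.take (j + 1))
      (((List.range' 1 k).foldl (pvKmpStep cs) ([0], 0)).1.getD j 0)) ∧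
    ((List.range' 1 k).foldl (pvKmpStep cs) ([0], 0)).2 =
      ((List.range' 1 k).foldl (pvKmpStep cs) ([0], 0)).1.getD k 0 := by
  intro k
  induction k with
  | zero =>
      intro h
      refine ⟨rfl, ?_, rfl⟩
      intro j hj
      obtain rfl : j = 0 := by omega
      constructor
      · exact isB_zero _ (by simp; omega)
      · intro b hb
        have := hb.1
        simp at this
        omega
  | succ k ih =>
      intro h
      obtain ⟨ihl, ihm, ihc⟩ := ih (by omega)
      have hconcat : List.range' 1 (k + 1) = List.range' 1 k ++ [1 + k] := by
        rw [List.range'_concat]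
        simp
      rw [hconcat, List.foldl_append, List.foldl_cons, List.foldl_nil]
      set st := (List.range' 1 k).foldl (pvKmpStep cs) ([0], 0) with hst
      have hstp : st = (st.1, st.2) := rfl
      have := step_spec cs st.1 st.2 (1 + k) (by omega) (by omega) (by omega)
        (fun j hj => ihm j (by omega)) (by rw [ihc]; congr 1; omega)
      rw [← hstp] at this
      obtain ⟨h1', h2', h3'⟩ := this
      refine ⟨by rw [h1']; omega, ?_, ?_⟩
      · intro j hj
        exact h2' j (by omega)
      · rw [h3']
        congr 1
        omega

-- the chain loop descends to the smallest positive border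
theorem chain_spec (cs : List Char) (lps : List Nat) (hlen : lps.length = cs.length)
    (hlps : ∀ j, j < lps.length → MaxB (cs.take (j + 1)) (lps.getD j 0)) :
    ∀ fuel b, b ≤ fuel → 1 ≤ b → IsB cs b →
      IsB cs (pvChain lps b fuel) ∧ 1 ≤ pvChain lps b fuel ∧
      ∀ b', IsB cs b' → 1 ≤ b' → pvChain lps b fuel ≤ b' := by
  intro fuel
  induction fuel with
  | zero => intro b hb h1 _; omega
  | succ f ihf =>
      intro b hb h1 hB
      have hblen : b < cs.length := hB.1
      have hmax : MaxB (cs.take (b - 1 + 1)) (lps.getD (b - 1) 0) :=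
        hlps (b - 1) (by omega)
      rw [show b - 1 + 1 = b by omega] at hmax
      have hxlt : lps.getD (b - 1) 0 < b := by
        have h := hmax.1.1
        rw [List.length_take] at h
        omega
      rw [pvChain]
      by_cases hx : lps.getD (b - 1) 0 > 0
      · rw [if_pos hx]
        refine ihf _ (by omega) (by omega) ?_
        rw [border_take cs b _ hB hxlt]
        exact hmax.1
      · rw [if_neg hx]
        refine ⟨hB, h1, ?_⟩
        intro b' hb' h1'
        by_contra hlt
        rw [not_le] at hlt
        have : IsB (cs.take b) b' := by
          rw [← border_take cs b _ hB (by omega)]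
          exact hb'
        have := hmax.2 b' this
        omega

-- A's countdown k-range is the image of the ascending Nat b-range under b ↦ n - b
theorem range_map (n : Nat) :
    PySem.List.pyRange ((n : Int) - 1) 0 (-1) =
      (List.range' 1 (n - 1)).map (fun (b : Nat) => (n : Int) - (b : Int)) := by
  rw [PySem.List.pyRange_neg_one, List.range'_eq_map_range, List.map_map]
  have h : ((n : Int) - 1 - 0).toNat = n - 1 := by omega
  rw [h]
  exact List.map_congr_left (fun k hk => by
    simp only [Function.comp_apply]
    push_cast
    ring)

-- A's loop over candidates b = a, a+1, … returns n - r when r is the minimal positive border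
theorem aloop_scan (s : String) (r : Nat) (hr : IsB s.toList r) (h1r : 1 ≤ r)
    (hmin : ∀ b, IsB s.toList b → 1 ≤ b → r ≤ b) :
    ∀ m a, 1 ≤ a → a ≤ r → r < a + m → a + m ≤ s.toList.length →
      pvALoop s (s.toList.length : Int)
        ((List.range' a m).map (fun (b : Nat) => (s.toList.length : Int) - (b : Int))) =
        (s.toList.length : Int) - (r : Int) := by
  intro m
  induction m with
  | zero => intro a _ h2 h3 _; omega
  | succ m ih =>
      intro a ha h2 h3 h4
      have hrlen : r < s.toList.length := hr.1
      rw [List.range'_succ, List.map_cons]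
      rw [pvALoop]
      by_cases hae : a = r
      · subst hae
        rw [if_pos ((valid_iff s a ha (by omega)).mpr hr)]
      · have hnb : ¬ IsB s.toList a := fun h => by have := hmin a h ha; omega
        rw [if_neg (by
          intro hv
          exact hnb ((valid_iff s a ha (by omega)).mp hv))]
        exact ih (a + 1) (by omega) (by omega) (by omega) (by omega)

-- with no positive border at all, A's loop falls through to -1
theorem aloop_scan_none (s : String) (hnone : ∀ b, IsB s.toList b → b = 0) :
    ∀ m a, 1 ≤ a → a + m ≤ s.toList.length →
      pvALoop s (s.toList.length : Int)
        ((List.range' a m).map (fun (b : Nat) => (s.toList.length : Int) - (b : Int))) = -1 := by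
  intro m
  induction m with
  | zero => intro a _ _; rfl
  | succ m ih =>
      intro a ha h4
      rw [List.range'_succ, List.map_cons]
      rw [pvALoop]
      rw [if_neg (by
        intro hv
        have := hnone a ((valid_iff s a ha (by omega)).mp hv)
        omega)]
      exact ih (a + 1) (by omega) (by omega)

-- ===== VERDICT =====
theorem getLongestPrefix_spec : Claim_equal_getLongestPrefix := by
  intro s _
  unfold Spec_getLongestPrefix getLongestPrefix getLongestPrefix_alt
  simp only [PySem.Str.len_eq]
  set cs := s.toList with hcs
  set n := cs.length with hn
  by_cases hn1 : n ≤ 1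
  · rw [if_pos hn1]
    rw [PySem.List.pyRange_neg_one_eq_nil (by omega)]
    rfl
  · rw [if_neg hn1]
    rw [not_le] at hn1
    obtain ⟨hLlen, hLmax, -⟩ := fold_spec cs (n - 1) (by omega)
    set st := (List.range' 1 (n - 1)).foldl (pvKmpStep cs) ([0], 0) with hst
    have hLlen' : st.1.length = n := by omega
    have hmaxb0 : MaxB cs (st.1.getD (n - 1) 0) := by
      have h := hLmax (n - 1) (by omega)
      rw [show n - 1 + 1 = n by omega, hn, List.take_length] at h
      exact h
    rw [range_map n]
    by_cases hb0 : st.1.getD (n - 1) 0 = 0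
    · rw [if_pos hb0]
      refine aloop_scan_none s ?_ (n - 1) 1 le_rfl (by rw [← hcs]; omega)
      intro b hb
      have := hmaxb0.2 b hb
      omega
    · rw [if_neg hb0]
      obtain ⟨hrB, hr1, hrmin⟩ := chain_spec cs st.1 (by omega)
        (fun j hj => hLmax j (by omega))
        (st.1.getD (n - 1) 0) (st.1.getD (n - 1) 0) le_rfl (by omega) hmaxb0.1
      have hrlen : pvChain st.1 (st.1.getD (n - 1) 0) (st.1.getD (n - 1) 0) < n := hrB.1
      exact aloop_scan s _ hrB hr1 hrmin (n - 1) 1 le_rfl hr1 (by omega)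
        (by rw [← hcs]; omega)
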